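-- pv_equiv track=rewrite | github.com/bestinslot-xyz/OPI | modules/brc20_index/brc20_index.py | is_positive_number_with_dot
-- ===== SOURCE A (Python) =====
-- def is_positive_number_with_dot(s, do_strip=False):
--   try:
--     if do_strip:
--       s = s.strip()
--     try:
--       dotFound = False
--       if len(s) == 0: return False
--       if s[0] == '.': return False
--       if s[-1] == '.': return False
--       for ch in s:
--         if ord(ch) > ord('9') or ord(ch) < ord('0'):
--           if ch != '.': return False
--           if dotFound: return False
--           dotFound = True
--       return True
--     except KeyboardInterrupt:
--       raise KeyboardInterrupt
--     except: return False
--   except KeyboardInterrupt: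
--     raise KeyboardInterrupt
--   except: return False ## has to be a string
-- ===== SOURCE B (Python) =====
-- def is_positive_number_with_dot(s, do_strip=False):
--     if do_strip:
--         s = s.strip()
--     i = 0
--     while i < len(s) and '0' <= s[i] <= '9':
--         i += 1
--     if i == 0:
--         return False
--     if i == len(s):
--         return True
--     if s[i] != '.':
--         return False
--     frac = s[i + 1:]
--     return frac != "" and all('0' <= c <= '9' for c in frac)
-- ===== Notes on version B (the rewrite author's own statement) =====
-- stated objective: simpler
-- what changed: Replaced A's single character scan with a dotFound flag (plus separate first/last-char dot checks) by a two-phase parse: consume the maximal ASCII-digit prefix, then require either end of string or a dot followed by a nonempty all-digit fraction.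
import Mathlib
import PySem

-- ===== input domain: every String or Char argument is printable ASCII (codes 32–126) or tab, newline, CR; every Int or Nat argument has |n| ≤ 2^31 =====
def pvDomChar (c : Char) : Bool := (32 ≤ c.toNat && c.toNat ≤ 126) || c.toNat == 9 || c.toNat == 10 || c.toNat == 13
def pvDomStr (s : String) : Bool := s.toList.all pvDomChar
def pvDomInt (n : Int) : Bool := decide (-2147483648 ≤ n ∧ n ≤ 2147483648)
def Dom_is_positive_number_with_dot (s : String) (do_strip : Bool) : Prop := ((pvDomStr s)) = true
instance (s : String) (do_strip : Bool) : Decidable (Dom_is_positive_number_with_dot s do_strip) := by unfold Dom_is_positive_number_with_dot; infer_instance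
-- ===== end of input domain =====

-- B replaces A's single char-scan with a dotFound flag by a two-phase parse
-- (digit prefix, then an optional dot-and-digits fraction) — objective: simpler.

-- ===== PORT A =====
-- the 'for ch in s' loop with its dotFound flag, transliterated as structural recursion
def pvALoop : List Char → Bool → Bool
  | [], _ => true
  | ch :: rest, dotFound =>
    if '9'.toNat < ch.toNat ∨ ch.toNat < '0'.toNat then
      if ch ≠ '.' then false
      else if dotFound then false
      else pvALoop rest true
    else pvALoop rest dotFound

def is_positive_number_with_dot (s : String) (do_strip : Bool) : Bool :=
  let s := if do_strip then PySem.Str.strip s else s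
  let cs := s.toList
  if cs.length = 0 then false
  else if PySem.List.pyGet? cs 0 = some '.' then false
  else if PySem.List.pyGet? cs (-1) = some '.' then false
  else pvALoop cs false

-- ===== PORT B =====
def pvBDig (c : Char) : Bool := decide ('0' ≤ c ∧ c ≤ '9')

def is_positive_number_with_dot_alt (s : String) (do_strip : Bool) : Bool :=
  let s := if do_strip then PySem.Str.strip s else s
  let cs := s.toList
  -- the while loop advances i over the maximal digit prefix: i = (takeWhile).length
  let intPart := cs.takeWhile pvBDig
  let rest := cs.drop intPart.length
  if intPart.length = 0 then false
  else
    match rest with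
    | [] => true
    | c :: frac => if c ≠ '.' then false else decide (frac ≠ []) && frac.all pvBDig

-- ===== PRECONDITION & SPEC =====
def Spec_is_positive_number_with_dot (s : String) (do_strip : Bool) (out : Bool) : Prop := out = is_positive_number_with_dot_alt s do_strip
instance (s : String) (do_strip : Bool) (out : Bool) : Decidable (Spec_is_positive_number_with_dot s do_strip out) := by unfold Spec_is_positive_number_with_dot; infer_instance

-- ===== CLAIM (what is proved, stated in full; the proofs are below) =====
def Claim_equal_is_positive_number_with_dot : Prop := ∀ (s : String) (do_strip : Bool), Dom_is_positive_number_with_dot s do_strip → Spec_is_positive_number_with_dot s do_strip (is_positive_number_with_dot s do_strip)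

-- ===== LEMMAS AND PROOFS =====

theorem pvChar_le_iff (a c : Char) : (a ≤ c) ↔ a.toNat ≤ c.toNat := by
  rw [Char.le_def, UInt32.le_iff_toNat_le]
  exact Iff.rfl

theorem pvBDig_iff (c : Char) : pvBDig c = true ↔ (48 ≤ c.toNat ∧ c.toNat ≤ 57) := by
  unfold pvBDig
  rw [decide_eq_true_iff, pvChar_le_iff, pvChar_le_iff]
  exact Iff.rfl

theorem pvBDig_dot : pvBDig '.' = false := by decide

theorem pvALoop_digit {d : Char} (rs : List Char) (f : Bool) (hd : pvBDig d = true) :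
    pvALoop (d :: rs) f = pvALoop rs f := by
  have h := (pvBDig_iff d).mp hd
  have e9 : '9'.toNat = 57 := rfl
  have e0 : '0'.toNat = 48 := rfl
  have hc : ¬('9'.toNat < d.toNat ∨ d.toNat < '0'.toNat) := by rw [e9, e0]; omega
  simp only [pvALoop, if_neg hc]

theorem pvALoop_dot_false (rs : List Char) : pvALoop ('.' :: rs) false = pvALoop rs true := by
  have hc : ('9'.toNat < '.'.toNat ∨ '.'.toNat < '0'.toNat) := by decide
  simp only [pvALoop, if_pos hc]
  simp

theorem pvALoop_dot_true (rs : List Char) : pvALoop ('.' :: rs) true = false := by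
  have hc : ('9'.toNat < '.'.toNat ∨ '.'.toNat < '0'.toNat) := by decide
  simp only [pvALoop, if_pos hc]
  simp

theorem pvALoop_bad {d : Char} (rs : List Char) (f : Bool) (hd : pvBDig d = false)
    (hne : d ≠ '.') : pvALoop (d :: rs) f = false := by
  have hnd : ¬(48 ≤ d.toNat ∧ d.toNat ≤ 57) := by
    intro h
    have h2 := (pvBDig_iff d).mpr h
    rw [hd] at h2
    cases h2
  have e9 : '9'.toNat = 57 := rfl
  have e0 : '0'.toNat = 48 := rfl
  have hc : ('9'.toNat < d.toNat ∨ d.toNat < '0'.toNat) := by rw [e9, e0]; omega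
  simp only [pvALoop, if_pos hc, if_pos hne]

-- once a dot has been seen, the loop accepts exactly the all-digit strings
theorem pvALoop_true (cs : List Char) : pvALoop cs true = cs.all pvBDig := by
  induction cs with
  | nil => rfl
  | cons c rest ih =>
    cases hd : pvBDig c with
    | true => rw [pvALoop_digit rest true hd, List.all_cons, hd, Bool.true_and, ih]
    | false =>
      by_cases hdot : c = '.'
      · subst hdot
        rw [pvALoop_dot_true, List.all_cons, pvBDig_dot, Bool.false_and]
      · rw [pvALoop_bad rest true hd hdot, List.all_cons, hd, Bool.false_and]

-- an all-digit list cannot end in '.'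
theorem pvAll_getLast (cs : List Char) (h : cs.all pvBDig = true) :
    cs.getLast? ≠ some '.' := by
  intro hl
  have hm : '.' ∈ cs := List.mem_of_getLast? hl
  have := List.all_eq_true.mp h _ hm
  rw [pvBDig_dot] at this
  exact Bool.false_ne_true this

-- tail check: after at least one digit has already been consumed
theorem pvTail (rest : List Char) :
    ((decide (rest = []) || decide (rest.getLast? ≠ some '.')) && pvALoop rest false) =
      (match rest.drop (rest.takeWhile pvBDig).length with
        | [] => true
        | c :: frac => if c ≠ '.' then false else decide (frac ≠ []) && frac.all pvBDig) := by
  induction rest with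
  | nil => rfl
  | cons d rs ih =>
    cases hd : pvBDig d with
    | true =>
      have hne : d ≠ '.' := fun he => by rw [he, pvBDig_dot] at hd; cases hd
      rw [show (d :: rs).takeWhile pvBDig = d :: rs.takeWhile pvBDig from by
            simp [hd]]
      simp only [List.length_cons, List.drop_succ_cons]
      rw [← ih, pvALoop_digit rs false hd]
      cases rs with
      | nil => simp [hne, pvALoop]
      | cons x xs => simp [List.getLast?_cons_cons]
    | false =>
      have htk : (d :: rs).takeWhile pvBDig = [] := by simp [hd]
      rw [htk]
      simp only [List.length_nil, List.drop_zero]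
      by_cases hdot : d = '.'
      · subst hdot
        rw [pvALoop_dot_false, pvALoop_true]
        cases rs with
        | nil => simp
        | cons x xs =>
          simp only [List.getLast?_cons_cons]
          cases hall : (x :: xs).all pvBDig with
          | true =>
            have hlast := pvAll_getLast _ hall
            simp [hlast]
          | false => simp [hall]
      · rw [pvALoop_bad rs false hd hdot]
        simp [hdot]

theorem pvGet0 (c : Char) (rest : List Char) :
    PySem.List.pyGet? (c :: rest) 0 = some c := by
  simp [PySem.List.pyGet?, PySem.List.pyIdx?]

theorem pvGetNeg1 (c : Char) (rest : List Char) :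
    PySem.List.pyGet? (c :: rest) (-1) = (c :: rest).getLast? := by
  simp only [PySem.List.pyGet?, PySem.List.pyIdx?]
  rw [List.getLast?_eq_getElem?]
  simp only [List.length_cons]
  rw [if_neg (by omega), if_pos (by push_cast; omega)]
  congr 1


-- a boolean ite with a false branch is a conjunction with the negated test
theorem pvIteFalse (p : Prop) [Decidable p] (b : Bool) :
    (if p then false else b) = ((!decide p) && b) := by
  by_cases h : p
  · rw [if_pos h, decide_eq_true h]; rfl
  · rw [if_neg h, decide_eq_false h]; rfl

-- the whole checks agree on any char list
theorem pvCore (cs : List Char) :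
    (if cs.length = 0 then false
     else if PySem.List.pyGet? cs 0 = some '.' then false
     else if PySem.List.pyGet? cs (-1) = some '.' then false
     else pvALoop cs false) =
    (if (cs.takeWhile pvBDig).length = 0 then false
     else
      match cs.drop (cs.takeWhile pvBDig).length with
      | [] => true
      | c :: frac => if c ≠ '.' then false else decide (frac ≠ []) && frac.all pvBDig) := by
  cases cs with
  | nil => rfl
  | cons c rest =>
    rw [pvGet0]
    cases hd : pvBDig c with
    | false =>
      have htk : (c :: rest).takeWhile pvBDig = [] := by simp [hd]
      rw [htk]
      by_cases hdot : c = '.'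
      · subst hdot; simp
      · rw [pvALoop_bad rest false hd hdot]
        simp [hdot]
    | true =>
      have hne : c ≠ '.' := fun he => by rw [he, pvBDig_dot] at hd; cases hd
      have htk : (c :: rest).takeWhile pvBDig = c :: rest.takeWhile pvBDig := by
        simp [hd]
      rw [htk, pvGetNeg1]
      simp only [List.length_cons, if_neg (by omega : ¬(rest.length + 1 = 0)),
        if_neg (by omega : ¬((rest.takeWhile pvBDig).length + 1 = 0)),
        List.drop_succ_cons]
      rw [if_neg (by simp [hne]), pvALoop_digit rest false hd, pvIteFalse, ← pvTail]
      cases rest with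
      | nil => simp [hne, pvALoop]
      | cons x xs => simp [List.getLast?_cons_cons]

-- ===== VERDICT (by name: the statement is the Claim_ definition above) =====
theorem is_positive_number_with_dot_spec : Claim_equal_is_positive_number_with_dot := by
  intro s do_strip _
  unfold Spec_is_positive_number_with_dot
  unfold is_positive_number_with_dot is_positive_number_with_dot_alt
  dsimp only []
  exact pvCore ((if do_strip = true then PySem.Str.strip s else s).toList)
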